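-- pv_equiv track=rewrite | github.com/Yo1ogreyZz/CellularAutomata | GraphRepresent.py | rule_number_to_table
-- ===== SOURCE A (Python) =====
-- from typing import List, Tuple, Dict, Any
--
-- def rule_number_to_table(rule_number: int) -> Dict[Tuple[int, ...], int]:
--     """
--     Wolfram ECA convention:
--     Neighborhood order: 111,110,101,100,011,010,001,000
--     Map to bits of rule_number from MSB to LSB.
--     """
--     neighborhoods = [
--         (1, 1, 1),
--         (1, 1, 0),
--         (1, 0, 1),
--         (1, 0, 0),
--         (0, 1, 1),
--         (0, 1, 0),
--         (0, 0, 1),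
--         (0, 0, 0),
--     ]
--     if not (0 <= rule_number <= 255):
--         raise ValueError("Wolfram ECA rule number must be in [0, 255].")
--
--     rule_binary = format(rule_number, '08b')  # MSB -> LSB, e.g., 30 -> '00011110'
--     rule_outputs = [int(bit) for bit in rule_binary]
--
--     rule_table: Dict[Tuple[int, ...], int] = {}
--     for neighborhood, output in zip(neighborhoods, rule_outputs):
--         rule_table[neighborhood] = output
--
--     return rule_table
-- ===== SOURCE B (Python) =====
-- def rule_number_to_table(rule_number: int):
--     if not (0 <= rule_number <= 255):
--         raise ValueError("Wolfram ECA rule number must be in [0, 255].")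
--     rule_table = {}
--     for v in range(7, -1, -1):
--         rule_table[((v >> 2) & 1, (v >> 1) & 1, v & 1)] = (rule_number >> v) & 1
--     return rule_table
-- ===== Notes on version B (the rewrite author's own statement) =====
-- stated objective: idiomatic
-- what changed: B replaces the hardcoded 8-neighborhood list and the format('08b')/string-digit-parsing pass with a single loop over range(7,-1,-1) that derives each neighborhood key and its output directly by integer bit arithmetic.
import Mathlib
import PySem

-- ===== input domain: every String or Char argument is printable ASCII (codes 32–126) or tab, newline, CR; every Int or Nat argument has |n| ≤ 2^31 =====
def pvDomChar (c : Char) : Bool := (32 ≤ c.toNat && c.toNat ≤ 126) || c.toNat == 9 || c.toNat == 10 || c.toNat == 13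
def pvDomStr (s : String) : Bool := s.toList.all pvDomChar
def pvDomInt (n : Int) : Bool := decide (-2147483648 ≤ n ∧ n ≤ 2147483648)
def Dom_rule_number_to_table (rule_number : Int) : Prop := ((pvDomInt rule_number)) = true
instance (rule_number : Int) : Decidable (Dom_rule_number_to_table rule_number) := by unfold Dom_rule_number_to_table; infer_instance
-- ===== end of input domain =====

-- B derives neighborhood keys and outputs by bit arithmetic over range(7,-1,-1) instead of a
-- hardcoded neighborhood list zipped with a parsed '08b' format string (objective: idiomatic).


-- ===== PORT A =====
def rule_number_to_table (rule_number : Int) : List (Int × Int × Int × Int) :=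
  let neighborhoods : List (Int × Int × Int) :=
    [(1,1,1),(1,1,0),(1,0,1),(1,0,0),(0,1,1),(0,1,0),(0,0,1),(0,0,0)]
  -- format(rule_number, '08b'): binary digits left-padded with '0' to width 8 — exact for the
  -- 0 ≤ rule_number ≤ 255 inputs admitted by Pre_ (A raises ValueError outside them)
  let binChars := PySem.Int.toBinChars rule_number
  let ruleBinary := List.replicate (8 - binChars.length) '0' ++ binChars
  -- int(bit): ofChars? is always `some` here since every bit is a digit '0'/'1'
  let ruleOutputs : List Int := ruleBinary.map (fun c => (PySem.Int.ofChars? [c]).getD 0)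
  let ruleTable := (neighborhoods.zip ruleOutputs).foldl
    (fun (d : PySem.Dict (Int × Int × Int) Int) p => d.insert p.1 p.2) PySem.Dict.empty
  ruleTable.items.map (fun p => (p.1.1, p.1.2.1, p.1.2.2, p.2))

-- ===== PORT B =====
def rule_number_to_table_alt (rule_number : Int) : List (Int × Int × Int × Int) :=
  -- Python's x >> k on the nonnegative x, k here is Lean's x >>> k.toNat; x & 1 is PySem.Int.band x 1
  let ruleTable := (PySem.List.pyRange 7 (-1) (-1)).foldl
    (fun (d : PySem.Dict (Int × Int × Int) Int) (v : Int) =>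
      d.insert (PySem.Int.band (v >>> Int.toNat 2) 1, PySem.Int.band (v >>> Int.toNat 1) 1, PySem.Int.band v 1)
               (PySem.Int.band (rule_number >>> Int.toNat v) 1))
    PySem.Dict.empty
  ruleTable.items.map (fun p => (p.1.1, p.1.2.1, p.1.2.2, p.2))

-- ===== PRECONDITION & SPEC =====
-- A raises ValueError outside [0, 255]; Pre_ admits exactly the inputs on which A returns.
def Pre_rule_number_to_table (rule_number : Int) : Prop := 0 ≤ rule_number ∧ rule_number ≤ 255
instance (rule_number : Int) : Decidable (Pre_rule_number_to_table rule_number) := by unfold Pre_rule_number_to_table; infer_instance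
def pvWitness_rule_number_to_table : Int := 30

def Spec_rule_number_to_table (rule_number : Int) (out : List (Int × Int × Int × Int)) : Prop := out = rule_number_to_table_alt rule_number
instance (rule_number : Int) (out : List (Int × Int × Int × Int)) : Decidable (Spec_rule_number_to_table rule_number out) := by unfold Spec_rule_number_to_table; infer_instance

-- ===== CLAIM (what is proved, stated in full; the proofs are below) =====
def Claim_equal_rule_number_to_table : Prop := ∀ (rule_number : Int), Dom_rule_number_to_table rule_number → Pre_rule_number_to_table rule_number → Spec_rule_number_to_table rule_number (rule_number_to_table rule_number)

-- ===== LEMMAS AND PROOFS =====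
lemma rule_number_to_table_eq_alt_of_bounds (n : Int) (h0 : 0 ≤ n) (h1 : n ≤ 255) :
    rule_number_to_table n = rule_number_to_table_alt n := by
  interval_cases n <;> decide

-- ===== VERDICT (by name: the statement is the Claim_ definition above) =====
theorem rule_number_to_table_spec : Claim_equal_rule_number_to_table := by
  intro n _ hpre
  exact rule_number_to_table_eq_alt_of_bounds n hpre.1 hpre.2
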